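-- pv_equiv track=rewrite | github.com/YashMakan/c2py | multiverse/C/c2py/Cmodules/Ctype.py | isgraph
-- ===== SOURCE A (Python) =====
-- def isgraph(text):
-- 	graphs='''!"#$%&'()*+,-./0123456789:;<=>?@ABCDEFGHIJKLMNOPQRSTUVWXYZ[\\]^_`abcdefghijklmnopqrstuvwxyz{|}~'''
-- 	t=[char for char in text]
-- 	final=[]
-- 	for val in t:
-- 		if val in graphs:
-- 			final='yes'
-- 		else:
-- 			final='no'
-- 			break
-- 	if final=='yes':
-- 		return 1
-- 	else:
-- 		return 0
-- ===== SOURCE B (Python) =====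
-- def isgraph(text):
-- 	if not text:
-- 		return 0
-- 	ords = [ord(c) for c in text]
-- 	return 1 if 33 <= min(ords) and max(ords) <= 126 else 0
-- ===== Notes on version B (the rewrite author's own statement) =====
-- stated objective: alternative
-- what changed: Instead of scanning characters with a break-driven membership test against a 94-char table, B reduces the string to two aggregates (min and max of the character ordinals) and decides by comparing those two numbers against the range bounds 33 and 126, which is exactly the ASCII graph set.
import Mathlib
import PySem

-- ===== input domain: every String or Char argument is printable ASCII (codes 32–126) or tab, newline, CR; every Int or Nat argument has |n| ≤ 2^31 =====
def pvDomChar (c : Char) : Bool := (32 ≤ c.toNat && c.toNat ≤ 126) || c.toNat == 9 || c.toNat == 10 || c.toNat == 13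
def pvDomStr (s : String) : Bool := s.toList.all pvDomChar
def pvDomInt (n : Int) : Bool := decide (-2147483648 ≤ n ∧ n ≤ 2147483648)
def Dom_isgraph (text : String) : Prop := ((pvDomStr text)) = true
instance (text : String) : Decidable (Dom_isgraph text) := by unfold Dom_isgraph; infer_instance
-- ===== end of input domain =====

-- B replaces A's break-driven table-membership scan by a min/max reduction of the character ordinals compared against the range bounds 33..126 (alternative decomposition; same behaviour, empty string still yields 0).


-- ===== PORT A =====
-- A's constant table 'graphs' (the backslash is escaped; Python's '\\' is one backslash)
def graphsA : List Char := "!\"#$%&'()*+,-./0123456789:;<=>?@ABCDEFGHIJKLMNOPQRSTUVWXYZ[\\]^_`abcdefghijklmnopqrstuvwxyz{|}~".toList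

-- A's for-loop over t with the string variable 'final' and the break; 'val in graphs'
-- for a one-character val is character membership, ported as graphsA.contains.
def isgraphLoopA : List Char → String → String
  | [], final => final
  | c :: rest, _ => if graphsA.contains c then isgraphLoopA rest "yes" else "no"

def isgraph (text : String) : Int :=
  let t := text.toList
  let final := isgraphLoopA t ""   -- Python's initial final=[] never equals 'yes'; "" plays that role
  if final = "yes" then 1 else 0

-- ===== PORT B =====
-- B: bail out on the empty string, build the ordinal list, then compare min/max against 33/126.
def isgraph_alt (text : String) : Int :=
  if text.toList.isEmpty then 0
  else
    let ords := text.toList.map (fun c => (c.toNat : Int))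
    match PySem.List.min? ords (fun x => x), PySem.List.max? ords (fun x => x) with
    | some mn, some mx => if 33 ≤ mn ∧ mx ≤ 126 then 1 else 0
    | _, _ => 0

-- ===== PRECONDITION & SPEC =====
def Spec_isgraph (text : String) (out : Int) : Prop := out = isgraph_alt text
instance (text : String) (out : Int) : Decidable (Spec_isgraph text out) := by unfold Spec_isgraph; infer_instance

-- ===== CLAIM (what is proved, stated in full; the proofs are below) =====
def Claim_equal_isgraph : Prop := ∀ (text : String), Dom_isgraph text → Spec_isgraph text (isgraph text)

-- ===== LEMMAS AND PROOFS =====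

-- On domain characters (codes 32–126, tab, LF, CR) membership in A's table is exactly the range 33..126.
theorem mem_graphsA (c : Char) (h : pvDomChar c = true) :
    graphsA.contains c = (33 ≤ c.toNat && c.toNat ≤ 126) := by
  have h1 : c.toNat ≤ 126 := by simp [pvDomChar] at h; omega
  have key : ∀ n : Nat, n ≤ 126 →
      graphsA.contains (Char.ofNat n) = (33 ≤ (Char.ofNat n).toNat && (Char.ofNat n).toNat ≤ 126) := by
    set_option maxRecDepth 10000 in decide
  rw [← Char.ofNat_toNat c]
  exact key c.toNat h1

-- Once the loop is running its state is "yes"; it ends in "yes" iff every remaining char is in range.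
theorem loopA_yes (l : List Char) (h : l.all pvDomChar = true) :
    (decide (isgraphLoopA l "yes" = "yes") : Bool) = l.all (fun c => 33 ≤ c.toNat && c.toNat ≤ 126) := by
  induction l with
  | nil => simp [isgraphLoopA]
  | cons c rest ih =>
    simp only [List.all_cons, Bool.and_eq_true] at h
    simp only [isgraphLoopA, mem_graphsA c h.1, List.all_cons]
    by_cases hc : (33 ≤ c.toNat && c.toNat ≤ 126) = true
    · simp [hc, ih h.2]
    · simp [Bool.eq_false_iff.mpr hc]

-- B's aggregate test equals the pointwise range check: for a nonempty ordinal list,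
-- 33 ≤ min ∧ max ≤ 126 holds iff every element is in [33, 126].
theorem minmax_range (l : List Int) (mn mx : Int)
    (hmn : PySem.List.min? l (fun x => x) = some mn)
    (hmx : PySem.List.max? l (fun x => x) = some mx) :
    (33 ≤ mn ∧ mx ≤ 126) ↔ (∀ x ∈ l, 33 ≤ x ∧ x ≤ 126) := by
  constructor
  · rintro ⟨h1, h2⟩ x hx
    exact ⟨le_trans h1 (PySem.List.min?_isMin hmn x hx),
           le_trans (PySem.List.max?_isMax hmx x hx) h2⟩
  · intro h
    exact ⟨(h mn (PySem.List.min?_mem hmn)).1, (h mx (PySem.List.max?_mem hmx)).2⟩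

-- ===== VERDICT (by name: the statement is the Claim_ definition above) =====
theorem isgraph_spec : Claim_equal_isgraph := by
  intro text hdom
  have hall : text.toList.all pvDomChar = true := hdom
  unfold Spec_isgraph isgraph isgraph_alt
  cases hl : text.toList with
  | nil => simp [isgraphLoopA]
  | cons c rest =>
    rw [hl] at hall
    have hdomc := hall
    simp only [List.all_cons, Bool.and_eq_true] at hdomc
    -- reduce A to the pointwise range check
    have hA : (decide (isgraphLoopA (c :: rest) "" = "yes") : Bool)
        = (c :: rest).all (fun c => 33 ≤ c.toNat && c.toNat ≤ 126) := by
      simp only [isgraphLoopA, mem_graphsA c hdomc.1, List.all_cons]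
      by_cases hc : (33 ≤ c.toNat && c.toNat ≤ 126) = true
      · simp [hc, loopA_yes rest hdomc.2]
      · simp [Bool.eq_false_iff.mpr hc]
    -- B's min/max exist on the nonempty list
    set ords := (c :: rest).map (fun c => (c.toNat : Int)) with hords
    have hne : ords ≠ [] := by simp [hords]
    obtain ⟨mn, hmn⟩ := Option.ne_none_iff_exists'.mp
      (fun h => hne ((PySem.List.min?_eq_none_iff ords (fun x => x)).mp h))
    obtain ⟨mx, hmx⟩ := Option.ne_none_iff_exists'.mp
      (fun h => hne ((PySem.List.max?_eq_none_iff ords (fun x => x)).mp h))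
    simp only [List.isEmpty_cons, Bool.false_eq_true, if_false, hmn, hmx]
    have hiff := minmax_range ords mn mx hmn hmx
    have hpt : (∀ x ∈ ords, 33 ≤ x ∧ x ≤ 126)
        ↔ ((c :: rest).all (fun c => 33 ≤ c.toNat && c.toNat ≤ 126) = true) := by
      simp [hords, List.all_eq_true]
    by_cases hB : 33 ≤ mn ∧ mx ≤ 126
    · have : (c :: rest).all (fun c => 33 ≤ c.toNat && c.toNat ≤ 126) = true :=
        hpt.mp (hiff.mp hB)
      rw [this] at hA
      simp only [decide_eq_true_eq] at hA
      simp [hA, hB]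
    · have hall' : ¬ ((c :: rest).all (fun c => 33 ≤ c.toNat && c.toNat ≤ 126) = true) :=
        fun h => hB (hiff.mpr (hpt.mpr h))
      rw [Bool.eq_false_iff.mpr hall'] at hA
      simp only [decide_eq_false_iff_not] at hA
      simp [hA, hB]
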